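-- pv_equiv track=rewrite | github.com/ASHISH-KUMAR-PANDEY/python | Dartboard.py | make_dartboard
-- ===== SOURCE A (Python) =====
-- def make_dartboard(n):
--
--   board = []
--   highest = 1
--   for num in range(int(n/2)+1):
--     row = []
--     score = 1
--     d = highest - 1
--     for numb in range(n):
--       row.append(str(score))
--       if score < highest:
--         score += 1
--
--     for numb in range(1, 1+d):
--       row[-numb] = str(0 + numb)
--     board.append(int(''.join(row)))
--     highest += 1
--
--   if n%2!=0:
--     return board + list(reversed(board[:-1]))
--   else:
--     return board + list(reversed(board[:-2]))
-- ===== SOURCE B (Python) =====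
-- def make_dartboard(n):
--     half = int(n / 2)
--     cap = [min(i + 1, n - i) for i in range(n)]
--     board = [int(''.join([str(min(c, h)) for c in cap]))
--              for h in range(1, half + 2)]
--     if n % 2 != 0:
--         return board + board[:-1][::-1]
--     return board + board[:-2][::-1]
-- ===== Notes on version B (the rewrite author's own statement) =====
-- stated objective: simpler
-- what changed: Each row digit is computed directly by the closed form min(i+1, n-i, highest) — a precomputed cap list min(i+1, n-i) clipped at highest — replacing A's two-stage build of an ascending row followed by in-place overwriting of its tail with negative-index assignments.
-- outside the precondition, e.g. on make_dartboard(0): A raises ValueError, B raises ValueError; on make_dartboard(-1): A raises ValueError, B raises ValueError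
import Mathlib
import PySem

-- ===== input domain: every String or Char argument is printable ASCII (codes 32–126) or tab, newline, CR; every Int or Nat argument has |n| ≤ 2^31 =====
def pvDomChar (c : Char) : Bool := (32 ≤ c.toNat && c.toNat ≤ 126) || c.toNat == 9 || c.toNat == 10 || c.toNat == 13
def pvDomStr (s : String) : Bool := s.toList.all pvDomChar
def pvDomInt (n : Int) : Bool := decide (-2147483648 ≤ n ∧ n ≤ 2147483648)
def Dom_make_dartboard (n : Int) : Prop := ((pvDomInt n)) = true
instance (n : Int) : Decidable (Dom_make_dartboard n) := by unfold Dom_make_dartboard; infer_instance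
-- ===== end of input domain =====

-- B computes each row digit by the closed form min(i+1, n-i, highest) in one pass,
-- replacing A's ascending build followed by in-place tail overwriting (objective: simpler).


-- ===== PORT A =====
-- A-side helper: the body of A's outer loop for one value of `highest`, step for step:
-- build the ascending row, then overwrite the last d entries via the negative-index
-- assignment row[-numb] (index len(row) - numb, always in range here), then int(''.join(row)).
-- int('') raises ValueError (only n ∈ {0, -1}); excluded by Pre_, the port uses .getD 0 there.
def pvRowA (n highest : Int) : Int :=
  let d := highest - 1
  let rs :=
    (PySem.List.pyRange 0 n 1).foldl
      (fun (rs : List String × Int) _ =>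
        (rs.1 ++ [PySem.Int.toStr rs.2],
         if rs.2 < highest then rs.2 + 1 else rs.2))
      ([], 1)
  let row :=
    (PySem.List.pyRange 1 (1 + d) 1).foldl
      (fun (row : List String) numb =>
        row.set (row.length - numb.toNat) (PySem.Int.toStr (0 + numb)))
      rs.1
  (PySem.Int.ofStr? (PySem.Str.join "" row)).getD 0

-- int(n/2) truncates toward zero (n/2 is an exact float for |n| ≤ 2^31): Int.tdiv.
def make_dartboard (n : Int) : List Int :=
  let st :=
    (PySem.List.pyRange 0 (Int.tdiv n 2 + 1) 1).foldl
      (fun (st : List Int × Int) _ => (st.1 ++ [pvRowA n st.2], st.2 + 1))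
      ([], 1)
  let board := st.1
  if PySem.Int.mod n 2 ≠ 0 then
    board ++ (PySem.List.slice board none (some (-1))).reverse
  else
    board ++ (PySem.List.slice board none (some (-2))).reverse

-- ===== PORT B =====
-- B-side helper: one row, every digit clipped to the closed-form cap min(i+1, n-i).
def pvRowB (cap : List Int) (h : Int) : Int :=
  (PySem.Int.ofStr? (PySem.Str.join ""
    (cap.map (fun c => PySem.Int.toStr (min c h))))).getD 0

def make_dartboard_alt (n : Int) : List Int :=
  let cap := (PySem.List.pyRange 0 n 1).map (fun i => min (i + 1) (n - i))
  let board := (PySem.List.pyRange 1 (Int.tdiv n 2 + 2) 1).map (pvRowB cap)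
  if PySem.Int.mod n 2 ≠ 0 then
    board ++ (PySem.List.slice board none (some (-1))).reverse
  else
    board ++ (PySem.List.slice board none (some (-2))).reverse

-- ===== PRECONDITION & SPEC =====
-- Pre_ excludes exactly n = 0 and n = -1, where A (and B) raise ValueError on int('').
def Pre_make_dartboard (n : Int) : Prop := 1 ≤ n ∨ n ≤ -2
instance (n : Int) : Decidable (Pre_make_dartboard n) := by unfold Pre_make_dartboard; infer_instance
def pvWitness_make_dartboard : Int := 5

def Spec_make_dartboard (n : Int) (out : List Int) : Prop := out = make_dartboard_alt n
instance (n : Int) (out : List Int) : Decidable (Spec_make_dartboard n out) := by unfold Spec_make_dartboard; infer_instance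

-- ===== CLAIM (what is proved, stated in full; the proofs are below) =====
def Claim_equal_make_dartboard : Prop := ∀ (n : Int), Dom_make_dartboard n → Pre_make_dartboard n → Spec_make_dartboard n (make_dartboard n)

-- ===== LEMMAS AND PROOFS =====

-- the ascending digit A's first stage writes at position i: str(min(i+1, highest))
def pvG (h : Int) (i : ℕ) : String := PySem.Int.toStr (min ((i : Int) + 1) h)

-- the row after the first D overwrites of A's second stage
def pvF (n h : Int) (N D : ℕ) : List String :=
  (List.range N).map (fun i => if N - D ≤ i then PySem.Int.toStr (n - (i : Int)) else pvG h i)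

theorem pvF_length (n h : Int) (N D : ℕ) : (pvF n h N D).length = N := by simp [pvF]

-- stage 1: A's first inner loop builds the ascending row, and score = min(k+1, h)
theorem pvStage1 (h : Int) (l : List Int) : ∀ (k : ℕ),
    l.foldl
      (fun (rs : List String × Int) _ =>
        (rs.1 ++ [PySem.Int.toStr rs.2], if rs.2 < h then rs.2 + 1 else rs.2))
      ((List.range k).map (pvG h), min ((k : Int) + 1) h)
    = ((List.range (k + l.length)).map (pvG h), min (((k + l.length : ℕ) : Int) + 1) h) := by
  induction l with
  | nil => intro k; simp
  | cons x xs ih =>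
    intro k
    have h1 : ((List.range k).map (pvG h)) ++ [PySem.Int.toStr (min ((k : Int) + 1) h)]
        = (List.range (k + 1)).map (pvG h) := by
      simp [List.range_succ, pvG]
    have h2 : (if min ((k : Int) + 1) h < h then min ((k : Int) + 1) h + 1 else min ((k : Int) + 1) h)
        = min (((k + 1 : ℕ) : Int) + 1) h := by
      push_cast; split_ifs <;> omega
    simp only [List.foldl_cons, h1, h2]
    have := ih (k + 1)
    simpa [Nat.add_comm, Nat.add_assoc, Nat.add_left_comm] using this

-- one overwrite of A's second stage advances pvF by one
theorem pvStep (n h : Int) (N D : ℕ) (hN : (N : Int) = n) (hD : D + 1 ≤ N) :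
    (pvF n h N D).set (N - (D + 1)) (PySem.Int.toStr ((D : Int) + 1)) = pvF n h N (D + 1) := by
  apply List.ext_getElem
  · simp [pvF]
  intro i hi1 hi2
  have hiN : i < N := by simpa [pvF] using hi2
  rw [List.getElem_set]
  simp only [pvF, List.getElem_map, List.getElem_range]
  by_cases hset : N - (D + 1) = i
  · rw [if_pos hset, if_pos (by omega : N - (D + 1) ≤ i)]
    congr 1; omega
  · rw [if_neg hset]
    have hiff : (N - (D + 1) ≤ i) ↔ (N - D ≤ i) := by omega
    simp only [hiff]

-- stage 2: A's overwrite loop realises pvF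
theorem pvStage2 (n h : Int) (N : ℕ) (hN : (N : Int) = n) (hn : 1 ≤ n) : ∀ (D : ℕ),
    2 * (D : Int) ≤ n →
    (PySem.List.pyRange 1 (1 + (D : Int)) 1).foldl
      (fun (row : List String) numb =>
        row.set (row.length - numb.toNat) (PySem.Int.toStr (0 + numb)))
      (pvF n h N 0)
    = pvF n h N D := by
  intro D
  induction D with
  | zero => intro _; simp [PySem.List.pyRange_one_eq_nil (by omega : (1 : Int) ≤ 1)]
  | succ D ih =>
    intro hle
    have hle' : 2 * (D : Int) ≤ n := by push_cast at hle ⊢; omega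
    have hrange : PySem.List.pyRange 1 (1 + ((D : Int) + 1)) 1
        = PySem.List.pyRange 1 (1 + (D : Int)) 1 ++ [1 + (D : Int)] := by
      have := PySem.List.pyRange_one_succ_right (a := 1) (b := 1 + (D : Int)) (by omega)
      simpa [add_assoc] using this
    push_cast
    rw [hrange, List.foldl_append, ih hle']
    simp only [List.foldl_cons, List.foldl_nil, pvF_length]
    have ht : (1 + (D : Int)).toNat = D + 1 := by omega
    have hD1 : D + 1 ≤ N := by push_cast at hle; omega
    rw [ht]
    have hts : (0 + (1 + (D : Int))) = ((D : Int) + 1) := by ring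
    rw [hts, pvStep n h N D hN hD1]

-- one row of A equals one row of B
theorem pvRow_eq (n h : Int) (hn : 1 ≤ n) (hh : 1 ≤ h) (hht : 2 * (h - 1) ≤ n) :
    pvRowA n h = pvRowB ((PySem.List.pyRange 0 n 1).map (fun i => min (i + 1) (n - i))) h := by
  have hN : ((n.toNat : Int)) = n := Int.toNat_of_nonneg (by omega)
  have hD : (((h - 1).toNat : Int)) = h - 1 := Int.toNat_of_nonneg (by omega)
  have hinit : (([] : List String), (1 : Int))
      = ((List.range 0).map (pvG h), min (((0 : ℕ) : Int) + 1) h) := by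
    simp [min_eq_left hh]
  have hlen : (0 + (PySem.List.pyRange 0 n 1).length) = n.toNat := by
    simp [PySem.List.length_pyRange_one]
  have hF0 : (List.range n.toNat).map (pvG h) = pvF n h n.toNat 0 := by
    rw [pvF]
    apply List.map_congr_left
    intro i hi
    rw [List.mem_range] at hi
    rw [if_neg (by omega)]
  have hfin : pvF n h n.toNat ((h - 1).toNat)
      = ((PySem.List.pyRange 0 n 1).map (fun i => min (i + 1) (n - i))).map
          (fun c => PySem.Int.toStr (min c h)) := by
    rw [PySem.List.pyRange_one, List.map_map, List.map_map, pvF]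
    simp only [sub_zero]
    apply List.map_congr_left
    intro i hi
    rw [List.mem_range] at hi
    by_cases hc : n.toNat - (h - 1).toNat ≤ i
    · rw [if_pos hc]; simp only [Function.comp]; congr 1; omega
    · rw [if_neg hc]; simp only [Function.comp, pvG]; congr 1; omega
  simp only [pvRowA, pvRowB]
  rw [hinit, pvStage1 h (PySem.List.pyRange 0 n 1) 0, hlen]
  rw [hF0, ← hD]
  rw [pvStage2 n h n.toNat hN hn ((h - 1).toNat) (by omega)]
  rw [hfin]

-- A's outer fold (for any row function f) produces the list of rows for highest = h, h+1, …
theorem pvOuterA (f : Int → Int) (l : List Int) : ∀ (b : List Int) (h : Int),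
    l.foldl (fun (st : List Int × Int) _ => (st.1 ++ [f st.2], st.2 + 1)) (b, h)
    = (b ++ (List.range l.length).map (fun (k : ℕ) => f (h + (k : Int))), h + (l.length : Int)) := by
  induction l with
  | nil => intro b h; simp
  | cons x xs ih =>
    intro b h
    simp only [List.foldl_cons, ih (b ++ [f h]) (h + 1), List.length_cons, Prod.mk.injEq]
    refine ⟨?_, by push_cast; ring⟩
    rw [List.range_succ_eq_map]
    simp only [List.map_cons, List.map_map, List.append_assoc, List.cons_append,
      List.nil_append, Nat.cast_zero, add_zero]
    congr 1
    congr 1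
    apply List.map_congr_left; intro a _
    simp [Function.comp, Nat.succ_eq_add_one]; congr 1; ring

-- ===== VERDICT (by name: the statement is the Claim_ definition above) =====
set_option maxHeartbeats 1000000 in
theorem make_dartboard_spec : Claim_equal_make_dartboard := by
  intro n hdom hpre
  unfold Spec_make_dartboard
  simp only [make_dartboard, make_dartboard_alt]
  rw [pvOuterA (pvRowA n) (PySem.List.pyRange 0 (Int.tdiv n 2 + 1) 1) [] 1]
  have hsign : (2 : Int).sign = 1 := rfl
  have ht : Int.tdiv n 2 = n / 2 + (if 0 ≤ n ∨ 2 ∣ n then 0 else 1) := by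
    rw [Int.tdiv_eq_ediv, hsign]
  have hboard : (List.range (PySem.List.pyRange 0 (Int.tdiv n 2 + 1) 1).length).map
        (fun (k : ℕ) => pvRowA n (1 + (k : Int)))
      = (PySem.List.pyRange 1 (Int.tdiv n 2 + 2) 1).map
          (pvRowB ((PySem.List.pyRange 0 n 1).map (fun i => min (i + 1) (n - i)))) := by
    rw [PySem.List.pyRange_one 1 (Int.tdiv n 2 + 2), List.map_map,
      PySem.List.length_pyRange_one]
    have hL : (Int.tdiv n 2 + 1 - 0).toNat = (Int.tdiv n 2 + 2 - 1).toNat := by omega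
    rw [hL]
    apply List.map_congr_left
    intro k hk
    rw [List.mem_range] at hk
    simp only [Function.comp_apply]
    have hk' : (k : Int) ≤ Int.tdiv n 2 := by omega
    have hn : 1 ≤ n := by
      rcases hpre with hp | hp
      · exact hp
      · exfalso
        rcases em (2 ∣ n) with hd | hd
        · rw [if_pos (Or.inr hd)] at ht; omega
        · rw [if_neg (by simp only [not_or]; exact ⟨by omega, hd⟩)] at ht; omega
    have h2 : 2 * Int.tdiv n 2 ≤ n := by
      rw [if_pos (Or.inl (by omega))] at ht; omega
    exact pvRow_eq n (1 + (k : Int)) hn (by omega) (by omega)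
  simp only [List.nil_append, hboard]
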